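-- pv_equiv track=rewrite | github.com/dgoldman0/graphnumbers | reboot/canonical_graph.py | encoding_for_perm
-- ===== SOURCE A (Python) =====
-- def encoding_for_perm(adj, perm_new_to_old):
--     """
--     Enc(P^T A P) in row-major upper-triangle order (including diagonal),
--     where perm_new_to_old maps new label -> old vertex.
--     """
--     n = len(adj)
--     out = []
--     for i_new in range(n):
--         u = perm_new_to_old[i_new]
--         out.append(1 if ((adj[u] >> u) & 1) else 0)  # diagonal
--         for j_new in range(i_new + 1, n):
--             v = perm_new_to_old[j_new]
--             out.append(1 if ((adj[u] >> v) & 1) else 0)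
--     return tuple(out)
-- ===== SOURCE B (Python) =====
-- def encoding_for_perm(adj, perm_new_to_old):
--     """Suffix-peeling pass: restrict the permutation to the first n old vertices,
--     then repeatedly emit one whole upper-triangle row (diagonal included) as a
--     single map over the current suffix of that vertex list and peel its head;
--     no index loops and no per-element permutation lookups."""
--     vs = list(perm_new_to_old[:len(adj)])
--     out = []
--     while vs:
--         r = adj[vs[0]]
--         out += [(r >> v) & 1 for v in vs]
--         vs = vs[1:]
--     return tuple(out)
-- ===== Notes on version B (the rewrite author's own statement) =====
-- stated objective: alternative
-- what changed: B replaces A's two nested index loops with perm lookups and a separate diagonal append by a suffix-peeling pass: it materializes the permuted vertex list perm[:n] once, then repeatedly emits a whole row as one map over the current suffix (diagonal is just its head) and peels that head, so no indices or permutation lookups appear in the emitting pass.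
import Mathlib
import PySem

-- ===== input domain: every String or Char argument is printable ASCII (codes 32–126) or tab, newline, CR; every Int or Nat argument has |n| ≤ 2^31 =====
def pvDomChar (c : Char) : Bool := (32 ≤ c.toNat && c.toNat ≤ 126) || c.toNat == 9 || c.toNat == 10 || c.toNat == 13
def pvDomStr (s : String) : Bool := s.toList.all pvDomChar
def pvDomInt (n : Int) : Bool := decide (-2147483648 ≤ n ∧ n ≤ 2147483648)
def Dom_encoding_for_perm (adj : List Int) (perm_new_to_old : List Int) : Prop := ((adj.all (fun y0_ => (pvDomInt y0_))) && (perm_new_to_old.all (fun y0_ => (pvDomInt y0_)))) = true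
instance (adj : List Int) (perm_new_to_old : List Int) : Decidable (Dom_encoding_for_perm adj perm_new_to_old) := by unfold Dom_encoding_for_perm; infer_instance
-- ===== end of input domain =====

-- B peels suffixes of the materialized permuted vertex list perm[:n], emitting each whole
-- upper-triangle row as one map over the suffix (objective: alternative decomposition, same cost).

-- ===== PORT A =====
def encoding_for_perm (adj : List Int) (perm_new_to_old : List Int) : List Int :=
  let n : Int := adj.length
  (PySem.List.pyRange 0 n 1).foldl (fun out i_new =>
    let u := PySem.List.pyGetD perm_new_to_old i_new 0
    let out := out ++ [if PySem.Int.band (PySem.List.pyGetD adj u 0 >>> u.toNat) 1 ≠ 0 then (1 : Int) else 0]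
    (PySem.List.pyRange (i_new + 1) n 1).foldl (fun out j_new =>
      let v := PySem.List.pyGetD perm_new_to_old j_new 0
      out ++ [if PySem.Int.band (PySem.List.pyGetD adj u 0 >>> v.toNat) 1 ≠ 0 then (1 : Int) else 0]) out) []

-- ===== PORT B =====
-- the 'while vs:' loop of Source B: structural recursion on the suffix vs, accumulator out
def pvPeel (adj : List Int) : List Int → List Int → List Int
  | [], out => out
  | u :: rest, out =>
      pvPeel adj rest
        (out ++ (u :: rest).map (fun v => PySem.Int.band (PySem.List.pyGetD adj u 0 >>> v.toNat) 1))

def encoding_for_perm_alt (adj : List Int) (perm_new_to_old : List Int) : List Int :=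
  let vs := PySem.List.slice perm_new_to_old none (some (adj.length : Int))
  pvPeel adj vs []

-- ===== PRECONDITION & SPEC =====
-- Pre_ excludes exactly the inputs where the Python A raises: a permutation list shorter than adj
-- (IndexError) or an entry among its first len(adj) values that is negative (ValueError on a
-- negative shift) or ≥ len(adj) (IndexError).
def Pre_encoding_for_perm (adj : List Int) (perm_new_to_old : List Int) : Prop :=
  adj.length ≤ perm_new_to_old.length ∧
  ∀ x ∈ perm_new_to_old.take adj.length, 0 ≤ x ∧ x < (adj.length : Int)
instance (adj : List Int) (perm_new_to_old : List Int) : Decidable (Pre_encoding_for_perm adj perm_new_to_old) := by unfold Pre_encoding_for_perm; infer_instance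
def pvWitness_encoding_for_perm : List Int × List Int := ([1, 2], [1, 0])
def Spec_encoding_for_perm (adj : List Int) (perm_new_to_old : List Int) (out : List Int) : Prop := out = encoding_for_perm_alt adj perm_new_to_old
instance (adj : List Int) (perm_new_to_old : List Int) (out : List Int) : Decidable (Spec_encoding_for_perm adj perm_new_to_old out) := by unfold Spec_encoding_for_perm; infer_instance

-- ===== CLAIM (what is proved, stated in full; the proofs are below) =====
def Claim_equal_encoding_for_perm : Prop := ∀ (adj : List Int) (perm_new_to_old : List Int), Dom_encoding_for_perm adj perm_new_to_old → Pre_encoding_for_perm adj perm_new_to_old → Spec_encoding_for_perm adj perm_new_to_old (encoding_for_perm adj perm_new_to_old)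

-- ===== LEMMAS AND PROOFS =====

-- the single upper-triangle bit A computes, in index form
def pvBit (adj perm : List Int) (i j : Int) : Int :=
  PySem.Int.band (PySem.List.pyGetD adj (PySem.List.pyGetD perm i 0) 0 >>>
    (PySem.List.pyGetD perm j 0).toNat) 1

-- A's result as a row-major flatMap over index ranges
def pvCanon (adj perm : List Int) : List Int :=
  (PySem.List.pyRange 0 (adj.length : Int) 1).flatMap (fun i =>
    pvBit adj perm i i :: (PySem.List.pyRange (i + 1) (adj.length : Int) 1).map (fun j => pvBit adj perm i j))

theorem pv_ite_band1 (a : Int) :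
    (if PySem.Int.band a 1 ≠ 0 then (1 : Int) else 0) = PySem.Int.band a 1 := by
  rw [PySem.Int.band_one, PySem.Int.mod_eq_emod_of_pos (by omega)]
  omega

theorem pv_A_eq_canon (adj perm : List Int) :
    encoding_for_perm adj perm = pvCanon adj perm := by
  unfold encoding_for_perm pvCanon pvBit
  simp only [pv_ite_band1, PySem.List.foldl_append_singleton_eq_map, List.append_assoc,
    List.singleton_append]
  rw [PySem.List.foldl_append_eq_flatMap]
  simp

-- the accumulator form of pvPeel
theorem pvPeel_append (adj : List Int) (vs out : List Int) :
    pvPeel adj vs out = out ++ pvPeel adj vs [] := by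
  induction vs generalizing out with
  | nil => simp [pvPeel]
  | cons u rest ih =>
      rw [pvPeel, pvPeel, ih, ih ([] ++ (u :: rest).map _)]
      simp

-- one row of pvCanon, read as B's map over the suffix of t = perm.take n
theorem pv_row_eq (adj perm : List Int)
    (hlen : adj.length ≤ perm.length) (k : Nat) (hk : k < adj.length) :
    pvBit adj perm (k : Int) (k : Int) ::
      (PySem.List.pyRange ((k : Int) + 1) (adj.length : Int) 1).map (fun j => pvBit adj perm (k : Int) j)
    = ((perm.take adj.length).drop k).map (fun v =>
        PySem.Int.band (PySem.List.pyGetD adj ((perm.take adj.length)[k]'(by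
          rw [List.length_take]; omega) ) 0 >>> v.toNat) 1) := by
  have ht : (perm.take adj.length).length = adj.length := by
    rw [List.length_take]; omega
  have hdrop := (PySem.List.map_pyGetD_pyRange' (perm.take adj.length) 0 (Int.natCast_nonneg k)).symm
  rw [ht] at hdrop
  simp only [Int.toNat_natCast] at hdrop
  rw [hdrop, List.map_map]
  have hcons : (PySem.List.pyRange ((k : Nat) : Int) ((adj.length : Nat) : Int) 1) =
      ((k : Nat) : Int) :: PySem.List.pyRange (((k : Nat) : Int) + 1) ((adj.length : Nat) : Int) 1 :=
    PySem.List.pyRange_one_cons (by exact_mod_cast hk)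
  rw [hcons, List.map_cons]
  congr 1
  · -- diagonal element
    unfold pvBit
    simp only [Function.comp_apply]
    rw [PySem.List.pyGetD_eq_getElem perm 0 (Int.natCast_nonneg k) (by exact_mod_cast Nat.lt_of_lt_of_le hk hlen),
        PySem.List.pyGetD_eq_getElem (perm.take adj.length) 0 (Int.natCast_nonneg k) (by rw [ht]; exact_mod_cast hk)]
    simp only [Int.toNat_natCast, List.getElem_take, Int.shiftRight_natCast_right]
  · -- off-diagonal row
    apply List.map_congr_left
    intro j hj
    rw [PySem.List.mem_pyRange_one] at hj
    have hj0 : 0 ≤ j := le_trans (by positivity) hj.1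
    have hjn : j < (adj.length : Int) := by exact_mod_cast hj.2
    unfold pvBit
    simp only [Function.comp_apply]
    rw [PySem.List.pyGetD_eq_getElem perm 0 (Int.natCast_nonneg k) (by exact_mod_cast Nat.lt_of_lt_of_le hk hlen),
        PySem.List.pyGetD_eq_getElem perm 0 hj0 (lt_of_lt_of_le hjn (by exact_mod_cast hlen)),
        PySem.List.pyGetD_eq_getElem (perm.take adj.length) 0 hj0 (by rw [ht]; exact hjn)]
    simp only [Int.toNat_natCast, List.getElem_take, Int.shiftRight_natCast_right]

-- A's canonical form from index k on equals B's peel of the corresponding suffix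
theorem pv_canon_suffix (adj perm : List Int)
    (hlen : adj.length ≤ perm.length) :
    ∀ (d k : Nat), k + d = adj.length →
    (PySem.List.pyRange (k : Int) (adj.length : Int) 1).flatMap (fun i =>
      pvBit adj perm i i :: (PySem.List.pyRange (i + 1) (adj.length : Int) 1).map (fun j => pvBit adj perm i j))
    = pvPeel adj ((perm.take adj.length).drop k) [] := by
  have ht : (perm.take adj.length).length = adj.length := by
    rw [List.length_take]; omega
  intro d
  induction d with
  | zero =>
      intro k hk
      rw [PySem.List.pyRange_one_eq_nil (by omega), List.flatMap_nil,
          List.drop_of_length_le (by omega)]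
      rfl
  | succ d ih =>
      intro k hk
      have hklt : k < adj.length := by omega
      have hkc : (k : Int) < (adj.length : Int) := by exact_mod_cast hklt
      have hkt : k < (perm.take adj.length).length := by omega
      calc (PySem.List.pyRange (k : Int) (adj.length : Int) 1).flatMap (fun i =>
              pvBit adj perm i i :: (PySem.List.pyRange (i + 1) (adj.length : Int) 1).map
                (fun j => pvBit adj perm i j))
          = (pvBit adj perm (k : Int) (k : Int) ::
              (PySem.List.pyRange ((k : Int) + 1) (adj.length : Int) 1).map
                (fun j => pvBit adj perm (k : Int) j)) ++
            (PySem.List.pyRange ((k : Int) + 1) (adj.length : Int) 1).flatMap (fun i =>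
              pvBit adj perm i i :: (PySem.List.pyRange (i + 1) (adj.length : Int) 1).map
                (fun j => pvBit adj perm i j)) := by
              rw [PySem.List.pyRange_one_cons hkc, List.flatMap_cons]
        _ = ((perm.take adj.length).drop k).map (fun v =>
              PySem.Int.band (PySem.List.pyGetD adj ((perm.take adj.length)[k]'hkt) 0 >>> v.toNat) 1) ++
            (PySem.List.pyRange ((k : Int) + 1) (adj.length : Int) 1).flatMap (fun i =>
              pvBit adj perm i i :: (PySem.List.pyRange (i + 1) (adj.length : Int) 1).map
                (fun j => pvBit adj perm i j)) := by
              rw [pv_row_eq adj perm hlen k hklt]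
        _ = ((perm.take adj.length).drop k).map (fun v =>
              PySem.Int.band (PySem.List.pyGetD adj ((perm.take adj.length)[k]'hkt) 0 >>> v.toNat) 1) ++
            pvPeel adj ((perm.take adj.length).drop (k + 1)) [] := by
              have hsucc : ((k : Int) + 1) = (((k + 1 : Nat)) : Int) := by push_cast; ring
              rw [hsucc, ih (k + 1) (by omega)]
        _ = pvPeel adj ((perm.take adj.length).drop k) [] := by
              conv_rhs => rw [List.drop_eq_getElem_cons hkt, pvPeel, pvPeel_append]
              rw [List.drop_eq_getElem_cons hkt]
              simp only [List.nil_append]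

theorem pv_B_eq (adj perm : List Int) :
    encoding_for_perm_alt adj perm = pvPeel adj (perm.take adj.length) [] := by
  unfold encoding_for_perm_alt
  rw [PySem.List.slice_to_natCast]

-- ===== VERDICT (by name: the statement is the Claim_ definition above) =====
theorem encoding_for_perm_spec : Claim_equal_encoding_for_perm := by
  intro adj perm _ hpre
  unfold Spec_encoding_for_perm
  rw [pv_A_eq_canon, pv_B_eq]
  unfold pvCanon
  have := pv_canon_suffix adj perm hpre.1 adj.length 0 (by omega)
  simpa using this
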